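-- pv_equiv track=rewrite | github.com/chenxy3791/algorithm_puzzles | Q47-gray-cyclic-steps.py | baseM_toGray
-- ===== SOURCE A (Python) =====
-- from   typing import List
--
-- def baseM_toGray(M: int, N: int, value: int) -> List:
--     '''
--     Parameters
--     ----------
--     M : int. Base
--     N : int. Number of digits
--     value : int. Natural decimal value of the input data
--
--     Returns
--     -------
--     List
--         The base-M gray code representation.
--         [0]: The most siginificant digit
--         [-1]: The least siginificant digit
--     '''
--     # Generate the normal base-M representation of value
--     baseM = N * [0]
--     for i in range(N-1,-1,-1):
--         baseM[i] = value % M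
--         value    = value //M
--
-- 	# Convert the normal baseM number into the Gray code equivalent.
--     # Note that, the loop starts at the most significant digit and goes down.
--     gray  = N * [0]
--     shift = 0
--     i     = 0
--     while i <= N-1:
-- 		# The Gray digit gets shifted down by the sum of the higher digits.
--         gray[i] = (baseM[i] + shift) % M
--         shift   = shift + M - gray[i];	# Subtract from base so shift is positive
--         i       = i + 1
--     return gray
-- ===== SOURCE B (Python) =====
-- def baseM_toGray(M, N, value):
--     # build the base-M digits, least significant first, then flip to MSB-first
--     digits = []
--     for _ in range(N):
--         digits.append(value % M)
--         value //= M
--     digits.reverse()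
--     if not digits:
--         return []
--     # Gray digit i is the mod-M difference of adjacent base-M digits
--     return [digits[0]] + [(b - a) % M for a, b in zip(digits, digits[1:])]
-- ===== Notes on version B (the rewrite author's own statement) =====
-- stated objective: simpler
-- what changed: B drops A's running `shift` accumulator and index-writing while-loop: it builds the digit list by appending LSB-first and reversing, then computes each Gray digit locally as (d[i]-d[i-1]) % M from a zip of adjacent digits.
import Mathlib
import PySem

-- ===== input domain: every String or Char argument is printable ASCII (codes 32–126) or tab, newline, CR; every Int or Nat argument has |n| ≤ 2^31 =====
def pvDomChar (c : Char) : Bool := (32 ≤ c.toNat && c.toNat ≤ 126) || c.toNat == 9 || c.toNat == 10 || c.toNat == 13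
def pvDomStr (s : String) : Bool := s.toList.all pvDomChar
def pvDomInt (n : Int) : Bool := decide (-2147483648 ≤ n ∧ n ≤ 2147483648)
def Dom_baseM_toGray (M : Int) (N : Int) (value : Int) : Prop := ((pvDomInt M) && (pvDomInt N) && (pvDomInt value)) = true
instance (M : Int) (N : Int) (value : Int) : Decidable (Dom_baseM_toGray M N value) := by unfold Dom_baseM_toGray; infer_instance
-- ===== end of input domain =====

-- B replaces A's running `shift` accumulator with per-position mod-M differences of
-- adjacent base-M digits and builds the digit list LSB-first then reverses it;
-- objective: simpler (no accumulated loop state).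

-- ===== PORT A =====
-- A's while loop: `while i <= N-1: gray[i] = (baseM[i]+shift) % M; shift = shift+M-gray[i]; i = i+1`
def grayLoopA (M : Int) (N : Int) (baseM : List Int) (gray : List Int) (shift : Int) (i : Int) : List Int :=
  if _h : i ≤ N - 1 then
    grayLoopA M N baseM
      (PySem.List.pySetD gray i (PySem.Int.mod (PySem.List.pyGetD baseM i 0 + shift) M))
      (shift + M - PySem.Int.mod (PySem.List.pyGetD baseM i 0 + shift) M) (i + 1)
  else gray
termination_by (N - i).toNat
decreasing_by omega

def baseM_toGray (M : Int) (N : Int) (value : Int) : List Int :=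
  -- baseM = N * [0]; for i in range(N-1, -1, -1): baseM[i] = value % M; value = value // M
  let st := (PySem.List.pyRange (N - 1) (-1) (-1)).foldl
      (fun (st : List Int × Int) i =>
        (PySem.List.pySetD st.1 i (PySem.Int.mod st.2 M), PySem.Int.floordiv st.2 M))
      (List.replicate N.toNat 0, value)
  -- gray = N * [0]; shift = 0; i = 0; while-loop; return gray
  grayLoopA M N st.1 (List.replicate N.toNat 0) 0 0

-- ===== PORT B =====
def baseM_toGray_alt (M : Int) (N : Int) (value : Int) : List Int :=
  -- digits = []; for _ in range(N): digits.append(value % M); value //= M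
  let st := (PySem.List.pyRange 0 N 1).foldl
      (fun (st : List Int × Int) _ =>
        (st.1 ++ [PySem.Int.mod st.2 M], PySem.Int.floordiv st.2 M))
      ([], value)
  -- digits.reverse(); if not digits: return []
  match st.1.reverse with
  | [] => []
  | d0 :: rest =>
      -- [digits[0]] + [(b - a) % M for a, b in zip(digits, digits[1:])]
      [d0] ++ ((d0 :: rest).zip rest).map (fun p => PySem.Int.mod (p.2 - p.1) M)

-- ===== PRECONDITION & SPEC =====
-- Pre_ excludes exactly the inputs where Python A raises ZeroDivisionError: M = 0 with N ≥ 1.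
def Pre_baseM_toGray (M : Int) (N : Int) (value : Int) : Prop := M ≠ 0 ∨ N ≤ 0
instance (M : Int) (N : Int) (value : Int) : Decidable (Pre_baseM_toGray M N value) := by unfold Pre_baseM_toGray; infer_instance
def pvWitness_baseM_toGray : Int × Int × Int := (3, 4, 10)

def Spec_baseM_toGray (M : Int) (N : Int) (value : Int) (out : List Int) : Prop := out = baseM_toGray_alt M N value
instance (M : Int) (N : Int) (value : Int) (out : List Int) : Decidable (Spec_baseM_toGray M N value out) := by unfold Spec_baseM_toGray; infer_instance

-- ===== CLAIM (what is proved, stated in full; the proofs are below) =====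
def Claim_equal_baseM_toGray : Prop := ∀ (M : Int) (N : Int) (value : Int), Dom_baseM_toGray M N value → Pre_baseM_toGray M N value → Spec_baseM_toGray M N value (baseM_toGray M N value)

-- ===== LEMMAS AND PROOFS =====

-- reference digit list: base-M digits of v, least significant first
def digsLSB (M : Int) : Nat → Int → List Int
  | 0, _ => []
  | n + 1, v => PySem.Int.mod v M :: digsLSB M n (PySem.Int.floordiv v M)

theorem length_digsLSB (M : Int) (n : Nat) (v : Int) : (digsLSB M n v).length = n := by
  induction n generalizing v with
  | zero => rfl
  | succ n ih => simp [digsLSB, ih]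

theorem mem_digsLSB (M : Int) (n : Nat) (v : Int) (x : Int) (hx : x ∈ digsLSB M n v) :
    ∃ w, x = PySem.Int.mod w M := by
  induction n generalizing v with
  | zero => simp [digsLSB] at hx
  | succ n ih =>
      simp only [digsLSB, List.mem_cons] at hx
      rcases hx with h | h
      · exact ⟨v, h⟩
      · exact ih _ h

-- B's first loop builds digsLSB
theorem foldB_eq (M : Int) (l : List Int) (acc : List Int) (v : Int) :
    (l.foldl (fun (st : List Int × Int) _ =>
        (st.1 ++ [PySem.Int.mod st.2 M], PySem.Int.floordiv st.2 M)) (acc, v)).1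
      = acc ++ digsLSB M l.length v := by
  induction l generalizing acc v with
  | nil => simp [digsLSB]
  | cons x xs ih => simp [List.foldl, ih, digsLSB]

-- A's first loop writes the same digits back-to-front into the zero list
theorem foldA_eq (M : Int) (k : Nat) (done : List Int) (v : Int) :
    ((PySem.List.pyRange ((k : Int) - 1) (-1) (-1)).foldl
        (fun (st : List Int × Int) i =>
          (PySem.List.pySetD st.1 i (PySem.Int.mod st.2 M), PySem.Int.floordiv st.2 M))
        (List.replicate k 0 ++ done, v)).1
      = (digsLSB M k v).reverse ++ done := by
  induction k generalizing done v with
  | zero => rw [PySem.List.pyRange_neg_one_eq_nil (by omega)]; simp [digsLSB]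
  | succ k ih =>
      rw [show ((((k : Nat) + 1 : Nat)) : Int) - 1 = (k : Int) by push_cast; ring]
      rw [PySem.List.pyRange_neg_one_cons (by omega)]
      simp only [List.foldl_cons]
      rw [show (List.replicate (k + 1) (0 : Int)) = List.replicate k 0 ++ [0] from List.replicate_succ']
      have hset : PySem.List.pySetD ((List.replicate k (0 : Int) ++ [0]) ++ done) (k : Int) (PySem.Int.mod v M)
          = List.replicate k 0 ++ (PySem.Int.mod v M :: done) := by
        rw [PySem.List.pySetD_natCast]
        simp [List.append_assoc]
      rw [List.append_assoc] at hset ⊢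
      simp only [hset]
      rw [ih]
      simp [digsLSB]

-- reference for A's while loop
def grayFrom (M : Int) : List Int → Int → List Int
  | [], _ => []
  | x :: xs, s =>
      let g := PySem.Int.mod (x + s) M
      g :: grayFrom M xs (s + M - g)

theorem grayLoopA_inv (M : Int) (drest : List Int) (dpre gpre : List Int) (s : Int)
    (h : dpre.length = gpre.length) :
    grayLoopA M ((dpre.length : Int) + drest.length) (dpre ++ drest)
        (gpre ++ List.replicate drest.length 0) s (dpre.length)
      = gpre ++ grayFrom M drest s := by
  induction drest generalizing dpre gpre s with
  | nil =>
      rw [grayLoopA, dif_neg (by simp only [List.length_nil]; push_cast; omega)]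
      simp [grayFrom]
  | cons x xs ih =>
      rw [grayLoopA, dif_pos (by simp only [List.length_cons]; push_cast; omega)]
      have hget : PySem.List.pyGetD (dpre ++ x :: xs) ((dpre.length : Int)) 0 = x := by
        rw [PySem.List.pyGetD_natCast]
        simp [List.getD_eq_getElem?_getD]
      rw [hget]
      set g := PySem.Int.mod (x + s) M with hg
      have hset : PySem.List.pySetD (gpre ++ List.replicate (x :: xs).length 0) ((dpre.length : Int)) g
          = (gpre ++ [g]) ++ List.replicate xs.length 0 := by
        rw [PySem.List.pySetD_natCast, h]
        simp [List.replicate_succ]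
      rw [hset]
      have harg1 : (dpre.length : Int) + (x :: xs).length = ((dpre ++ [x]).length : Int) + xs.length := by
        simp; ring
      have harg2 : dpre ++ x :: xs = (dpre ++ [x]) ++ xs := by simp
      have harg3 : (dpre.length : Int) + 1 = ((dpre ++ [x]).length : Int) := by simp
      rw [harg1, harg2, harg3, ih (dpre ++ [x]) (gpre ++ [g]) (s + M - g) (by simp [h])]
      simp only [grayFrom, ← hg]
      simp

-- Python % M only depends on the argument modulo M
theorem mod_congr (M a b : Int) (h : M ∣ a - b) : PySem.Int.mod a M = PySem.Int.mod b M := by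
  have hd : (M ∣ a) ↔ (M ∣ b) := by
    constructor <;> intro hx
    · have := dvd_sub hx h; simpa using this
    · have := dvd_add h hx; simpa using this
  have he : a % M = b % M := Int.modEq_iff_dvd.mpr (by simpa using (dvd_neg.mpr h))
  simp [PySem.Int.mod, Int.fmod_eq_emod, he, hd]

theorem dvd_sub_fmod (M a : Int) : M ∣ a - PySem.Int.mod a M := by
  have hm : a % M = a - M * (a / M) := Int.emod_def a M
  simp only [PySem.Int.mod, Int.fmod_eq_emod, hm]
  split_ifs
  · exact ⟨a / M, by ring⟩
  · exact ⟨a / M - 1, by ring⟩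

-- B's per-position difference form of A's shift recursion
def diffs (M : Int) : Int → List Int → List Int
  | _, [] => []
  | prev, x :: xs => PySem.Int.mod (x - prev) M :: diffs M x xs

theorem grayFrom_eq_diffs (M : Int) (rest : List Int) (prev s : Int)
    (h : M ∣ s + prev) : grayFrom M rest s = diffs M prev rest := by
  induction rest generalizing prev s with
  | nil => rfl
  | cons x xs ih =>
      simp only [grayFrom, diffs]
      have h1 : PySem.Int.mod (x + s) M = PySem.Int.mod (x - prev) M :=
        mod_congr M _ _ (by rw [show x + s - (x - prev) = s + prev by ring]; exact h)
      rw [h1]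
      congr 1
      apply ih
      have h2 := dvd_sub_fmod M (x + s)
      rw [← h1] at *
      have : (s + M - PySem.Int.mod (x + s) M) + x = ((x + s) - PySem.Int.mod (x + s) M) + M := by ring
      rw [this]
      exact dvd_add h2 ⟨1, by ring⟩

theorem zip_map_eq_diffs (M : Int) (rest : List Int) (prev : Int) :
    ((prev :: rest).zip rest).map (fun p => PySem.Int.mod (p.2 - p.1) M) = diffs M prev rest := by
  induction rest generalizing prev with
  | nil => rfl
  | cons x xs ih => simp [diffs, ih]

-- ===== VERDICT (by name: the statement is the Claim_ definition above) =====
theorem baseM_toGray_spec : Claim_equal_baseM_toGray := by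
  intro M N value _hdom _hpre
  unfold Spec_baseM_toGray baseM_toGray baseM_toGray_alt
  by_cases hN : N ≤ 0
  · rw [PySem.List.pyRange_neg_one_eq_nil (by omega), PySem.List.pyRange_one_eq_nil hN]
    simp only [List.foldl_nil]
    rw [show N.toNat = 0 by omega]
    rw [grayLoopA, dif_neg (by omega)]
    rfl
  · -- N ≥ 1
    replace hN : 0 < N := by omega
    set n := N.toNat with hn
    have hNn : N = (n : Int) := by omega
    -- first loops
    have hA1 : ((PySem.List.pyRange (N - 1) (-1) (-1)).foldl
        (fun (st : List Int × Int) i =>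
          (PySem.List.pySetD st.1 i (PySem.Int.mod st.2 M), PySem.Int.floordiv st.2 M))
        (List.replicate n 0, value)).1 = (digsLSB M n value).reverse := by
      rw [hNn]
      have := foldA_eq M n [] value
      simpa using this
    have hB1 : ((PySem.List.pyRange 0 N 1).foldl
        (fun (st : List Int × Int) _ =>
          (st.1 ++ [PySem.Int.mod st.2 M], PySem.Int.floordiv st.2 M)) ([], value)).1
        = digsLSB M n value := by
      have hl : (PySem.List.pyRange 0 N 1).length = n := by
        rw [PySem.List.length_pyRange_one]; omega
      rw [foldB_eq, hl]; simp
    -- the shared digit list, MSB first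
    set d := (digsLSB M n value).reverse with hd
    have hdlen : d.length = n := by simp [hd, length_digsLSB]
    have hA2 : grayLoopA M N d (List.replicate n 0) 0 0 = grayFrom M d 0 := by
      have h2 := grayLoopA_inv M d [] [] 0 rfl
      simp only [List.length_nil, Nat.cast_zero, List.nil_append, zero_add] at h2
      rw [hdlen] at h2
      rw [← hNn] at h2
      exact h2
    simp only [hA1, hB1]
    rw [hA2, ← hd]
    -- d is nonempty; its digits are mod-M residues
    rcases hdd : d with _ | ⟨d0, rest⟩
    · exfalso; rw [hdd] at hdlen; simp at hdlen; omega
    have hd0 : ∃ w, d0 = PySem.Int.mod w M := by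
      apply mem_digsLSB M n value
      have : d0 ∈ d := by rw [hdd]; exact List.mem_cons_self
      simpa [hd] using this
    rcases hd0 with ⟨w, hw⟩
    simp only [grayFrom]
    have hg0 : PySem.Int.mod (d0 + 0) M = d0 := by
      rw [add_zero, hw]
      exact Int.fmod_fmod_of_dvd w (dvd_refl M)
    rw [hg0]
    rw [grayFrom_eq_diffs M rest d0 (0 + M - d0) (by exact ⟨1, by ring⟩), zip_map_eq_diffs]
    rfl
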